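-- pv_equiv track=rewrite | github.com/zweissman/adventofcode | 2024/advent-2024-day15.py | adjust_grid_part_2
-- ===== SOURCE A (Python) =====
-- def adjust_grid_part_2(grid: list[list[str]]) -> list[list[str]]:
--     new_grid = []
--     for y in grid:
--         row = "".join(y)
--         row = row.replace("#", "##")
--         row = row.replace("O", "[]")
--         row = row.replace(".", "..")
--         row = row.replace("@", "@.")
--         new_grid.append(list(row))
--
--     return new_grid
-- ===== SOURCE B (Python) =====
-- expand = {'#': '##', 'O': '[]', '.': '..', '@': '@.'}
--
-- def adjust_grid_part_2(grid: list[list[str]]) -> list[list[str]]: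
--     new_grid = []
--     for y in grid:
--         row = []
--         for cell in y:
--             for ch in cell:
--                 row.extend(expand.get(ch, ch))
--         new_grid.append(row)
--     return new_grid
-- ===== Notes on version B (the rewrite author's own statement) =====
-- stated objective: idiomatic
-- what changed: Replaces A's four sequential full-row str.replace scans with a single table-driven pass over the characters, appending the expansion of each cell character once.
import Mathlib
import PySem

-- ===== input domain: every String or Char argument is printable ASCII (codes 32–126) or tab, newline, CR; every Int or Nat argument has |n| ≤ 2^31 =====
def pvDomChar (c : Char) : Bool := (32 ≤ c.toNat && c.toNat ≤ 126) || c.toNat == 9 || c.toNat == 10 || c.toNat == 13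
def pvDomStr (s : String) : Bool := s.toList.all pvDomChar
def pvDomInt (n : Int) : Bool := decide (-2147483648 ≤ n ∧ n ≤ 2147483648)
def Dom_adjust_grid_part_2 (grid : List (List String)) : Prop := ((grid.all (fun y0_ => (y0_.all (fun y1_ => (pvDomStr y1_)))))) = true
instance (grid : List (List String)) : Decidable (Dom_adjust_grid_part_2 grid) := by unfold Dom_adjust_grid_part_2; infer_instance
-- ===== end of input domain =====

-- B replaces A's four sequential full-row str.replace passes by one table-driven pass over the cells' characters (simpler/idiomatic; same output).

-- ===== PORT A =====
def adjust_grid_part_2 (grid : List (List String)) : List (List String) :=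
  grid.foldl (fun new_grid y =>
    let row := PySem.Str.join "" y
    let row := PySem.Str.replace row "#" "##"
    let row := PySem.Str.replace row "O" "[]"
    let row := PySem.Str.replace row "." ".."
    let row := PySem.Str.replace row "@" "@."
    new_grid ++ [row.toList.map (fun c => String.ofList [c])]) []

-- ===== PORT B =====
-- the module-level dict literal 'expand'
def pvExpandDict : PySem.Dict Char String :=
  PySem.Dict.mk [('#', "##"), ('O', "[]"), ('.', ".."), ('@', "@.")]

def adjust_grid_part_2_alt (grid : List (List String)) : List (List String) :=
  grid.foldl (fun new_grid y =>
    new_grid ++ [y.foldl (fun row cell =>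
      cell.toList.foldl (fun row ch =>
        -- row.extend(expand.get(ch, ch)): extending with a string adds its chars as 1-char strings
        row ++ (PySem.Dict.getD pvExpandDict ch (String.ofList [ch])).toList.map (fun c => String.ofList [c])) row) []]) []

-- ===== PRECONDITION & SPEC =====
def Spec_adjust_grid_part_2 (grid : List (List String)) (out : List (List String)) : Prop := out = adjust_grid_part_2_alt grid
instance (grid : List (List String)) (out : List (List String)) : Decidable (Spec_adjust_grid_part_2 grid out) := by unfold Spec_adjust_grid_part_2; infer_instance

-- ===== CLAIM (what is proved, stated in full; the proofs are below) =====
def Claim_equal_adjust_grid_part_2 : Prop := ∀ (grid : List (List String)), Dom_adjust_grid_part_2 grid → Spec_adjust_grid_part_2 grid (adjust_grid_part_2 grid)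

-- ===== LEMMAS AND PROOFS =====

-- the per-character expansion both programs realize
def pvExpF (c : Char) : List Char :=
  if c = '#' then ['#', '#'] else if c = 'O' then ['[', ']']
  else if c = '.' then ['.', '.'] else if c = '@' then ['@', '.'] else [c]

theorem replace_go_single (c : Char) (new : List Char) :
    ∀ (s acc : List Char) (fuel : Nat), s.length ≤ fuel →
      PySem.Chars.replace.go [c] new fuel s acc
        = acc.reverse ++ s.flatMap (fun x => if x = c then new else [x]) := by
  intro s
  induction s with
  | nil =>
    intro acc fuel _
    cases fuel <;> simp [PySem.Chars.replace.go]
  | cons x t ih =>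
    intro acc fuel hf
    cases fuel with
    | zero => simp at hf
    | succ fuel =>
      by_cases hx : x = c
      · subst hx
        have hpre : List.isPrefixOf [x] (x :: t) = true := by
          simp [List.isPrefixOf]
        simp only [PySem.Chars.replace.go, hpre, if_pos, List.length_cons,
          List.length_nil, Nat.zero_add, List.drop_succ_cons, List.drop_zero] at *
        rw [ih (new.reverse ++ acc) fuel (by omega)]
        simp
      · have hpre : List.isPrefixOf [c] (x :: t) = true → False := by
          simp [List.isPrefixOf]; intro h; exact hx h.symm
        simp only [PySem.Chars.replace.go]
        rw [if_neg (by simpa using hpre)]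
        rw [ih (x :: acc) fuel (by simpa using Nat.le_of_succ_le_succ hf)]
        simp [hx]

theorem replace_single (s : List Char) (c : Char) (new : List Char) :
    PySem.Chars.replace s [c] new = s.flatMap (fun x => if x = c then new else [x]) := by
  rw [PySem.Chars.replace]
  simp only [List.isEmpty_cons, if_false, Bool.false_eq_true]
  exact replace_go_single c new s [] s.length le_rfl

theorem four_replaces_eq_flatMap (cs : List Char) :
    PySem.Chars.replace (PySem.Chars.replace (PySem.Chars.replace (PySem.Chars.replace
      cs ['#'] ['#','#']) ['O'] ['[',']']) ['.'] ['.','.']) ['@'] ['@','.']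
      = cs.flatMap pvExpF := by
  simp only [replace_single, List.flatMap_assoc]
  refine List.flatMap_congr (fun x _ => ?_)
  by_cases h1 : x = '#'
  · subst h1; decide
  by_cases h2 : x = 'O'
  · subst h2; decide
  by_cases h3 : x = '.'
  · subst h3; decide
  by_cases h4 : x = '@'
  · subst h4; decide
  simp [pvExpF, h1, h2, h3, h4]

theorem getD_expand (ch : Char) :
    (PySem.Dict.getD pvExpandDict ch (String.ofList [ch])).toList = pvExpF ch := by
  by_cases h1 : ch = '#'
  · subst h1; decide
  by_cases h2 : ch = 'O'
  · subst h2; decide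
  by_cases h3 : ch = '.'
  · subst h3; decide
  by_cases h4 : ch = '@'
  · subst h4; decide
  have e1 : (('#' : Char) == ch) = false := by simp [Ne.symm h1]
  have e2 : (('O' : Char) == ch) = false := by simp [Ne.symm h2]
  have e3 : (('.' : Char) == ch) = false := by simp [Ne.symm h3]
  have e4 : (('@' : Char) == ch) = false := by simp [Ne.symm h4]
  simp [PySem.Dict.getD, PySem.Dict.get?, pvExpandDict, List.find?, e1, e2, e3, e4,
    pvExpF, h1, h2, h3, h4, String.toList_ofList]

theorem join_empty_sep (parts : List (List Char)) :
    PySem.Chars.join [] parts = parts.flatten := by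
  induction parts with
  | nil => rfl
  | cons h t ih =>
    cases t with
    | nil => simp [PySem.Chars.join, List.intercalate]
    | cons h' t' =>
      simp only [PySem.Chars.join, List.intercalate] at *
      simp_all [List.intersperse]

theorem row_eq (y : List String) :
    (PySem.Str.replace (PySem.Str.replace (PySem.Str.replace (PySem.Str.replace
        (PySem.Str.join "" y) "#" "##") "O" "[]") "." "..") "@" "@.").toList.map
        (fun c => String.ofList [c])
      = y.foldl (fun row cell =>
          cell.toList.foldl (fun row ch =>
            row ++ (PySem.Dict.getD pvExpandDict ch (String.ofList [ch])).toList.map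
              (fun c => String.ofList [c])) row) [] := by
  -- B side: collapse the two nested extend-loops into flatMaps
  have hinner : ∀ (cell : String) (row : List String),
      cell.toList.foldl (fun row ch =>
        row ++ (PySem.Dict.getD pvExpandDict ch (String.ofList [ch])).toList.map
          (fun c => String.ofList [c])) row
        = row ++ cell.toList.flatMap (fun ch => (pvExpF ch).map (fun c => String.ofList [c])) := by
    intro cell row
    rw [PySem.List.foldl_append_eq_flatMap]
    congr 1
    exact List.flatMap_congr (fun ch _ => by rw [getD_expand])
  have houter :
      y.foldl (fun row cell =>
        cell.toList.foldl (fun row ch =>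
          row ++ (PySem.Dict.getD pvExpandDict ch (String.ofList [ch])).toList.map
            (fun c => String.ofList [c])) row) []
        = y.flatMap (fun cell =>
            cell.toList.flatMap (fun ch => (pvExpF ch).map (fun c => String.ofList [c]))) := by
    have := PySem.List.foldl_congr_mem
      (l := y) (init := ([] : List String))
      (f := fun row cell =>
        cell.toList.foldl (fun row ch =>
          row ++ (PySem.Dict.getD pvExpandDict ch (String.ofList [ch])).toList.map
            (fun c => String.ofList [c])) row)
      (g := fun row cell =>
        row ++ cell.toList.flatMap (fun ch => (pvExpF ch).map (fun c => String.ofList [c])))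
      (fun acc x _ => hinner x acc)
    rw [this, PySem.List.foldl_append_eq_flatMap, List.nil_append]
  rw [houter]
  -- A side
  simp only [PySem.Str.toList_replace, PySem.Str.toList_join]
  have : ("" : String).toList = [] := rfl
  rw [this, join_empty_sep]
  have hh : ("#" : String).toList = ['#'] := rfl
  have hhh : ("##" : String).toList = ['#','#'] := rfl
  have ho : ("O" : String).toList = ['O'] := rfl
  have hob : ("[]" : String).toList = ['[',']'] := rfl
  have hd : ("." : String).toList = ['.'] := rfl
  have hdd : (".." : String).toList = ['.','.'] := rfl
  have ha : ("@" : String).toList = ['@'] := rfl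
  have had : ("@." : String).toList = ['@','.'] := rfl
  rw [hh, hhh, ho, hob, hd, hdd, ha, had, four_replaces_eq_flatMap, List.map_flatMap,
    ← List.flatMap_def, List.flatMap_assoc]

theorem adjust_grid_part_2_eq_alt (grid : List (List String)) :
    adjust_grid_part_2 grid = adjust_grid_part_2_alt grid := by
  unfold adjust_grid_part_2 adjust_grid_part_2_alt
  refine PySem.List.foldl_congr_mem _ _ _ _ (fun acc y _ => ?_)
  show acc ++ _ = acc ++ _
  rw [row_eq]

-- ===== VERDICT (by name: the statement is the Claim_ definition above) =====
theorem adjust_grid_part_2_spec : Claim_equal_adjust_grid_part_2 := by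
  intro grid _
  show adjust_grid_part_2 grid = adjust_grid_part_2_alt grid
  exact adjust_grid_part_2_eq_alt grid
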